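-- pv_equiv track=rewrite | github.com/salilab/imp | modules/core/dependency/python-ihm/ihm/format_bcif.py | _signed_decode
-- ===== SOURCE A (Python) =====
-- def _signed_decode(enc, data):
--     upper_limit = 0x7F if enc['byteCount'] == 1 else 0x7FFF
--     lower_limit = -upper_limit - 1
--     i = 0
--     while i < len(data):
--         value = 0
--         t = data[i]
--         while t == upper_limit or t == lower_limit:
--             value += t
--             i += 1
--             t = data[i]
--         yield value + t
--         i += 1
-- ===== SOURCE B (Python) =====
-- def _signed_decode(enc, data):
--     upper_limit = 0x7F if enc['byteCount'] == 1 else 0x7FFF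
--     lower_limit = -upper_limit - 1
--     # stage 1: split data into chunks, each ending at its first non-saturation value
--     chunks = []
--     cur = []
--     for t in data:
--         cur.append(t)
--         if t != upper_limit and t != lower_limit:
--             chunks.append(cur)
--             cur = []
--     # stage 2: each decoded value is the sum of its chunk
--     for chunk in chunks:
--         yield sum(chunk)
-- ===== Notes on version B (the rewrite author's own statement) =====
-- stated objective: alternative
-- what changed: Replaced A's nested index-based while loops with a running integer accumulator by a staged decomposition: first split the data into saturation-terminated chunks, then yield the sum of each chunk.
import Mathlib
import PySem

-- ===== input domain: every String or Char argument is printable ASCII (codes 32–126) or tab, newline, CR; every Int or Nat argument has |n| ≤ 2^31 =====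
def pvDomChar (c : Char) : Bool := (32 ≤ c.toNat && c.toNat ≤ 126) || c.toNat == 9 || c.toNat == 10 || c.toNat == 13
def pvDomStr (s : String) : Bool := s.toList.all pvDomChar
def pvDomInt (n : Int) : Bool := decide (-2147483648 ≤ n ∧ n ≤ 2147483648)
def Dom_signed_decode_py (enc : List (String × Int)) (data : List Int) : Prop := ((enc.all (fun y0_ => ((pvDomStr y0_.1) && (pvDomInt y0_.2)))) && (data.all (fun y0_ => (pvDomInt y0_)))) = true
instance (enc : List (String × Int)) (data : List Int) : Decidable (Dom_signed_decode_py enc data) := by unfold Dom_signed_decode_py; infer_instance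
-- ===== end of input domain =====

-- B replaces A's nested index-based while loops (running accumulator) by a staged
-- decomposition: split data into saturation-terminated chunks, then sum each chunk
-- (objective: alternative).

-- ===== PORT A =====
-- inner 'while t == upper_limit or t == lower_limit' loop: consumes saturation
-- values accumulating `value`; none = IndexError (data exhausted mid-run)
def pvAInner (u l value : Int) : List Int → Option (Int × List Int)
  | [] => none
  | t :: rest =>
      if t = u ∨ t = l then pvAInner u l (value + t) rest
      else some (value + t, rest)

theorem pvAInner_length : ∀ (data : List Int) (u l value v : Int) (r : List Int),
    pvAInner u l value data = some (v, r) → r.length < data.length := by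
  intro data
  induction data with
  | nil => intro u l value v r h; simp [pvAInner] at h
  | cons t rest ih =>
      intro u l value v r h
      simp only [pvAInner] at h
      split at h
      · exact Nat.lt_trans (ih u l (value + t) v r h) (Nat.lt_succ_self _)
      · injection h with h; injection h with _ h2; subst h2; simp

-- outer 'while i < len(data)' loop
def pvAOuter (u l : Int) (data : List Int) : List Int :=
  match h : pvAInner u l 0 data with
  | none => []   -- data exhausted (normal end, or IndexError — excluded by Pre_)
  | some (v, rest) => v :: pvAOuter u l rest
  termination_by data.length
  decreasing_by exact pvAInner_length _ _ _ _ _ _ h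

def signed_decode_py (enc : List (String × Int)) (data : List Int) : List Int :=
  match (PySem.Dict.mk enc).get? "byteCount" with
  | none => []   -- KeyError in Python — excluded by Pre_
  | some bc =>
      let upper_limit : Int := if bc = 1 then 0x7F else 0x7FFF
      let lower_limit : Int := -upper_limit - 1
      pvAOuter upper_limit lower_limit data

-- ===== PORT B =====
-- stage 1: split data into chunks, each ending at its first non-saturation value
def pvChunks (u l : Int) (cur : List Int) : List Int → List (List Int)
  | [] => []   -- an unfinished chunk `cur` is dropped (A raises there — outside Pre_)
  | t :: rest =>
      let cur' := cur ++ [t]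
      if ¬ t = u ∧ ¬ t = l then cur' :: pvChunks u l [] rest
      else pvChunks u l cur' rest

def signed_decode_py_alt (enc : List (String × Int)) (data : List Int) : List Int :=
  match (PySem.Dict.mk enc).get? "byteCount" with
  | none => []   -- KeyError in Python — excluded by Pre_
  | some bc =>
      let upper_limit : Int := if bc = 1 then 0x7F else 0x7FFF
      let lower_limit : Int := -upper_limit - 1
      -- stage 2: each decoded value is the sum of its chunk
      (pvChunks upper_limit lower_limit [] data).map List.sum

-- ===== PRECONDITION & SPEC =====
-- Pre_ excludes exactly the inputs on which Python A raises: enc without a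
-- 'byteCount' key (KeyError), and data ending in a saturation value (IndexError).
def Pre_signed_decode_py (enc : List (String × Int)) (data : List Int) : Prop :=
  let bc? := (PySem.Dict.mk enc).get? "byteCount"
  bc?.isSome = true ∧
  (let u : Int := if bc? = some 1 then 127 else 32767
   data.getLast? ≠ some u ∧ data.getLast? ≠ some (-u - 1))
instance (enc : List (String × Int)) (data : List Int) : Decidable (Pre_signed_decode_py enc data) := by
  unfold Pre_signed_decode_py; infer_instance
def pvWitness_signed_decode_py : (List (String × Int)) × List Int := ([("byteCount", 1)], [5, 127, 127, -3])

def Spec_signed_decode_py (enc : List (String × Int)) (data : List Int) (out : List Int) : Prop := out = signed_decode_py_alt enc data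
instance (enc : List (String × Int)) (data : List Int) (out : List Int) : Decidable (Spec_signed_decode_py enc data out) := by unfold Spec_signed_decode_py; infer_instance

-- ===== CLAIM (what is proved, stated in full; the proofs are below) =====
def Claim_equal_signed_decode_py : Prop := ∀ (enc : List (String × Int)) (data : List Int), Dom_signed_decode_py enc data → Pre_signed_decode_py enc data → Spec_signed_decode_py enc data (signed_decode_py enc data)

-- ===== LEMMAS AND PROOFS =====

-- B's chunk sums satisfy the same unfolding equation as A's outer loop, with the
-- pending chunk's sum playing the role of A's accumulator.
theorem pvChunks_sum_eq (u l : Int) : ∀ (data cur : List Int),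
    (pvChunks u l cur data).map List.sum =
      (match pvAInner u l cur.sum data with
       | none => []
       | some (v, r) => v :: (pvChunks u l [] r).map List.sum) := by
  intro data
  induction data with
  | nil => intro cur; simp [pvChunks, pvAInner]
  | cons t rest ih =>
      intro cur
      by_cases h : t = u ∨ t = l
      · have h' : ¬ (¬ t = u ∧ ¬ t = l) := by tauto
        simp only [pvChunks, pvAInner, if_pos h, if_neg h']
        have := ih (cur ++ [t])
        simpa [List.sum_append, add_comm] using this
      · have h' : ¬ t = u ∧ ¬ t = l := by tauto
        simp only [pvChunks, pvAInner, if_neg h, if_pos h']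
        simp [List.sum_append, add_comm]

theorem pvAOuter_eq_chunks (u l : Int) (data : List Int) :
    pvAOuter u l data = (pvChunks u l [] data).map List.sum := by
  suffices H : ∀ n (data : List Int), data.length ≤ n →
      pvAOuter u l data = (pvChunks u l [] data).map List.sum from
    H data.length data le_rfl
  intro n
  induction n with
  | zero =>
      intro data h
      have : data = [] := List.eq_nil_of_length_eq_zero (Nat.le_zero.mp h)
      subst this
      rw [pvAOuter]
      simp [pvAInner, pvChunks]
  | succ n ih =>
      intro data h
      rw [pvAOuter, pvChunks_sum_eq]
      have hz : (([] : List Int)).sum = 0 := rfl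
      rw [hz]
      cases hI : pvAInner u l 0 data with
      | none => rfl
      | some p =>
          obtain ⟨v, r⟩ := p
          have hlen : r.length < data.length := pvAInner_length _ _ _ _ _ _ hI
          simp only []
          rw [ih r (Nat.le_of_lt_succ (Nat.lt_of_lt_of_le hlen h))]

-- ===== VERDICT (by name: the statement is the Claim_ definition above) =====
theorem signed_decode_py_spec : Claim_equal_signed_decode_py := by
  intro enc data _ _
  unfold Spec_signed_decode_py signed_decode_py signed_decode_py_alt
  cases (PySem.Dict.mk enc).get? "byteCount" with
  | none => rfl
  | some bc => exact pvAOuter_eq_chunks _ _ data
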